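-- pv_equiv track=rewrite | github.com/Keiracom/Agency_OS | src/integrations/brightdata_client.py | pick_decision_maker
-- ===== SOURCE A (Python) =====
-- from typing import Optional
--
-- DM_TITLE_PRIORITY = [
--     "owner",
--     "founder",
--     "co-founder",
--     "director",
--     "principal",
--     "managing director",
--     "managing partner",
--     "managing",
--     "ceo",
--     "chief executive",
--     "proprietor",
--     "partner",
--     "president",
--     "general manager",
-- ]
--
-- HIGH_CONFIDENCE_THRESHOLD = 6  # owner, founder, co-founder, director, principal, managing director
--
-- def pick_decision_maker(people: list[dict]) -> Optional[dict]:
--     """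
--     Synchronous. Scores each person by DM_TITLE_PRIORITY.
--     Returns best match with confidence, or None if list is empty.
--     """
--     if not people:
--         return None
--
--     best_person = None
--     best_index = len(DM_TITLE_PRIORITY) + 1
--
--     for person in people:
--         title_raw = (person.get("title") or "").lower()
--         matched_index = len(DM_TITLE_PRIORITY)  # no match sentinel
--
--         for idx, keyword in enumerate(DM_TITLE_PRIORITY):
--             if keyword in title_raw:
--                 matched_index = idx
--                 break
--
--         if matched_index < best_index:
--             best_index = matched_index
--             best_person = person
--
--     if best_person is None:
--         # All had no title match — return first person with LOW confidence
--         best_person = people[0]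
--         confidence = "LOW"
--     elif best_index < HIGH_CONFIDENCE_THRESHOLD:
--         confidence = "HIGH"
--     else:
--         confidence = "MEDIUM"
--
--     return {
--         "name": best_person.get("name"),
--         "title": best_person.get("title"),
--         "linkedin_url": best_person.get("linkedin_url") or best_person.get("url"),
--         "confidence": confidence,
--     }
-- ===== SOURCE B (Python) =====
-- from typing import Optional
--
-- DM_TITLE_PRIORITY = [
--     "owner",
--     "founder",
--     "co-founder",
--     "director",
--     "principal",
--     "managing director",
--     "managing partner",
--     "managing",
--     "ceo",
--     "chief executive",
--     "proprietor",
--     "partner",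
--     "president",
--     "general manager",
-- ]
--
-- HIGH_CONFIDENCE_THRESHOLD = 6
--
--
-- def _result(person: dict, confidence: str) -> dict:
--     return {
--         "name": person.get("name"),
--         "title": person.get("title"),
--         "linkedin_url": person.get("linkedin_url") or person.get("url"),
--         "confidence": confidence,
--     }
--
--
-- def pick_decision_maker(people: list[dict]) -> Optional[dict]:
--     """Keyword-first: scan priority keywords in order; for each, take the first
--     person whose title contains it. No match at all -> first person, MEDIUM."""
--     if not people:
--         return None
--     for idx, keyword in enumerate(DM_TITLE_PRIORITY):
--         for person in people:
--             if keyword in (person.get("title") or "").lower():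
--                 conf = "HIGH" if idx < HIGH_CONFIDENCE_THRESHOLD else "MEDIUM"
--                 return _result(person, conf)
--     return _result(people[0], "MEDIUM")
-- ===== Notes on version B (the rewrite author's own statement) =====
-- stated objective: alternative
-- what changed: Replaces A's per-person best-index fold (scoring every person against every keyword with a sentinel and a strict-min accumulator) by a keyword-first search that returns the first person whose title contains the highest-priority matched keyword, with a direct first-person MEDIUM fallback when nothing matches (A's LOW branch is unreachable).
import Mathlib
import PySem

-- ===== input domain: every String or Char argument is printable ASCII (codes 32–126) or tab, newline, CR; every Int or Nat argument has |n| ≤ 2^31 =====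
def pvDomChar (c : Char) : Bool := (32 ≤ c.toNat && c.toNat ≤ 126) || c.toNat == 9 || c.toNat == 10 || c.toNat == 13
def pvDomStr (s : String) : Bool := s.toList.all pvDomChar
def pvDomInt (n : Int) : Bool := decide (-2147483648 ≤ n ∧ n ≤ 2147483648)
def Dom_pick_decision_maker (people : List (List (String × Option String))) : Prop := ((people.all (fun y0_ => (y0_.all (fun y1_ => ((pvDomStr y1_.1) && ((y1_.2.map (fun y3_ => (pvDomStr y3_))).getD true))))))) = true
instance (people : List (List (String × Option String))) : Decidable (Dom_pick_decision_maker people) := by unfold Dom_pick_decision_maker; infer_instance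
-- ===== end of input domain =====

-- B replaces A's per-person best-index fold by a keyword-first search (first person whose title
-- contains the highest-priority matched keyword), with a direct first-person MEDIUM fallback when
-- no keyword matches anyone (A's LOW branch is unreachable).

-- ===== PORT A =====
def DM_TITLE_PRIORITY : List String :=
  ["owner", "founder", "co-founder", "director", "principal", "managing director",
   "managing partner", "managing", "ceo", "chief executive", "proprietor", "partner",
   "president", "general manager"]

-- (person.get("title") or "").lower()  — this expression appears verbatim in both Pythons
def titleRaw (person : List (String × Option String)) : String :=
  PySem.Str.lower ((((PySem.Dict.mk person).get? "title").join).getD "")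

-- the result dict both Pythons build ('x or y' on Optional[str]: falsy = None or "")
def buildResult (person : List (String × Option String)) (confidence : String) :
    List (String × Option String) :=
  [("name", ((PySem.Dict.mk person).get? "name").join),
   ("title", ((PySem.Dict.mk person).get? "title").join),
   ("linkedin_url",
      match ((PySem.Dict.mk person).get? "linkedin_url").join with
      | some s => if s = "" then ((PySem.Dict.mk person).get? "url").join else some s
      | none => ((PySem.Dict.mk person).get? "url").join),
   ("confidence", some confidence)]

-- A's inner loop 'for idx, keyword in enumerate(DM_TITLE_PRIORITY): if keyword in title_raw: break'
def pvInner (t : String) : List (Int × String) → Int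
  | [] => (DM_TITLE_PRIORITY.length : Int)        -- no-match sentinel
  | (idx, kw) :: rest => if PySem.Str.isIn kw t then idx else pvInner t rest

-- A's outer loop, state = (best_person, best_index)
def pvALoop : List (List (String × Option String)) →
    Option (List (String × Option String)) × Int →
    Option (List (String × Option String)) × Int
  | [], st => st
  | person :: rest, (bp, bi) =>
    let mi := pvInner (titleRaw person) (PySem.List.enumerate DM_TITLE_PRIORITY 0)
    if mi < bi then pvALoop rest (some person, mi) else pvALoop rest (bp, bi)

def pick_decision_maker (people : List (List (String × Option String))) :
    Option (List (String × Option String)) :=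
  match people with
  | [] => none
  | p0 :: _ =>
    match pvALoop people (none, (DM_TITLE_PRIORITY.length : Int) + 1) with
    | (none, _) => some (buildResult p0 "LOW")
    | (some bp, bi) => some (buildResult bp (if bi < 6 then "HIGH" else "MEDIUM"))

-- ===== PORT B =====
-- B's inner loop 'for person in people: if keyword in …: return …'
def pvFind (kw : String) : List (List (String × Option String)) →
    Option (List (String × Option String))
  | [] => none
  | person :: rest => if PySem.Str.isIn kw (titleRaw person) then some person else pvFind kw rest

-- B's outer loop 'for idx, keyword in enumerate(DM_TITLE_PRIORITY)'
def pvScan : List (Int × String) → List (List (String × Option String)) →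
    Option (Int × List (String × Option String))
  | [], _ => none
  | (idx, kw) :: rest, people =>
    match pvFind kw people with
    | some person => some (idx, person)
    | none => pvScan rest people

def pick_decision_maker_alt (people : List (List (String × Option String))) :
    Option (List (String × Option String)) :=
  match people with
  | [] => none
  | p0 :: _ =>
    match pvScan (PySem.List.enumerate DM_TITLE_PRIORITY 0) people with
    | some (idx, person) => some (buildResult person (if idx < 6 then "HIGH" else "MEDIUM"))
    | none => some (buildResult p0 "MEDIUM")

-- ===== PRECONDITION & SPEC =====
def Spec_pick_decision_maker (people : List (List (String × Option String)))
    (out : Option (List (String × Option String))) : Prop :=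
  out = pick_decision_maker_alt people
instance (people : List (List (String × Option String))) (out : Option (List (String × Option String))) : Decidable (Spec_pick_decision_maker people out) := by
  unfold Spec_pick_decision_maker; infer_instance

-- ===== CLAIM (what is proved, stated in full; the proofs are below) =====
def Claim_equal_pick_decision_maker : Prop := ∀ (people : List (List (String × Option String))), Dom_pick_decision_maker people → Spec_pick_decision_maker people (pick_decision_maker people)

-- ===== LEMMAS AND PROOFS =====

-- first-match index of a person against the full priority list (A's matched_index)
def pvM (p : List (String × Option String)) : Int :=
  pvInner (titleRaw p) (PySem.List.enumerate DM_TITLE_PRIORITY 0)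

-- running minimum of A's fold
def pvJ (bi : Int) (xs : List (List (String × Option String))) : Int :=
  xs.foldl (fun a x => min a (pvM x)) bi

theorem DM_len : DM_TITLE_PRIORITY.length = 14 := by decide

-- pvInner over an enumerate block lands in [s, s+len) or is the sentinel 14
theorem pvInner_range (ks : List String) (s : Int) (t : String) :
    pvInner t (PySem.List.enumerate ks s) = 14 ∨
    (s ≤ pvInner t (PySem.List.enumerate ks s) ∧
      pvInner t (PySem.List.enumerate ks s) < s + ks.length) := by
  induction ks generalizing s with
  | nil => left; rw [PySem.List.enumerate_nil]; simp [pvInner, DM_len]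
  | cons k ks ih =>
    rw [PySem.List.enumerate_cons]
    simp only [pvInner]
    split
    · right
      refine ⟨le_refl s, ?_⟩
      simp only [List.length_cons]
      push_cast; omega
    · rcases ih (s + 1) with h | ⟨h1, h2⟩
      · left; exact h
      · right
        refine ⟨by omega, ?_⟩
        simp only [List.length_cons] at h2 ⊢
        push_cast at h2 ⊢; omega

-- a match somewhere in ks pins the result below s + len
theorem pvInner_lt_of_match (ks : List String) (s : Int) (t : String)
    (h : ∃ kw ∈ ks, PySem.Str.isIn kw t = true) :
    pvInner t (PySem.List.enumerate ks s) < s + ks.length := by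
  induction ks generalizing s with
  | nil => simp at h
  | cons k ks ih =>
    rw [PySem.List.enumerate_cons]
    simp only [pvInner]
    split
    · simp only [List.length_cons]; push_cast; omega
    · rename_i hk
      rcases h with ⟨kw, hmem, hin⟩
      rcases List.mem_cons.mp hmem with rfl | hmem'
      · exact absurd hin (by simpa using hk)
      · have := ih (s + 1) ⟨kw, hmem', hin⟩
        simp only [List.length_cons]
        push_cast at this ⊢; omega

-- a fully unmatched prefix of pairs is skipped
theorem pvInner_append_skip (ps qs : List (Int × String)) (t : String)
    (h : ∀ pr ∈ ps, PySem.Str.isIn pr.2 t = false) :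
    pvInner t (ps ++ qs) = pvInner t qs := by
  induction ps with
  | nil => rfl
  | cons p ps ih =>
    obtain ⟨i, kw⟩ := p
    simp only [List.cons_append, pvInner]
    rw [if_neg (by rw [h (i, kw) (by simp)]; simp)]
    exact ih (fun pr hpr => h pr (by simp [hpr]))

-- a match in the prefix makes the suffix irrelevant
theorem pvInner_append_match (ps qs : List (Int × String)) (t : String)
    (h : ∃ pr ∈ ps, PySem.Str.isIn pr.2 t = true) :
    pvInner t (ps ++ qs) = pvInner t ps := by
  induction ps with
  | nil => simp at h
  | cons p ps ih =>
    obtain ⟨i, kw⟩ := p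
    simp only [List.cons_append, pvInner]
    split
    · rfl
    · rename_i hk
      apply ih
      rcases h with ⟨pr, hmem, hin⟩
      rcases List.mem_cons.mp hmem with rfl | hmem'
      · exact absurd hin (by simpa using hk)
      · exact ⟨pr, hmem', hin⟩

theorem pvM_def (p : List (String × Option String)) :
    pvInner (titleRaw p) (PySem.List.enumerate DM_TITLE_PRIORITY 0) = pvM p := rfl

theorem pvM_le (p : List (String × Option String)) : pvM p ≤ 14 := by
  have h := pvInner_range DM_TITLE_PRIORITY 0 (titleRaw p)
  rw [DM_len, pvM_def] at h
  rcases h with h | ⟨_, h2⟩ <;> push_cast at * <;> omega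

theorem pvM_nonneg (p : List (String × Option String)) : 0 ≤ pvM p := by
  have h := pvInner_range DM_TITLE_PRIORITY 0 (titleRaw p)
  rw [pvM_def] at h
  rcases h with h | ⟨h1, _⟩ <;> omega

-- localization: with no match before position s, pvM is computed on the suffix from s
theorem pvM_eq_suffix (p : List (String × Option String)) (s : Nat) (ks : List String)
    (hdrop : List.drop s DM_TITLE_PRIORITY = ks) (hs : (s : Int) ≤ pvM p) :
    pvM p = pvInner (titleRaw p) (PySem.List.enumerate ks (s : Int)) := by
  have hsle : s ≤ DM_TITLE_PRIORITY.length := by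
    have h14 := pvM_le p
    rw [DM_len]
    omega
  have hsplit : DM_TITLE_PRIORITY = List.take s DM_TITLE_PRIORITY ++ ks := by
    rw [← hdrop, List.take_append_drop]
  have hlen : (List.take s DM_TITLE_PRIORITY).length = s := by
    rw [List.length_take]
    omega
  have hpre : ∀ pr ∈ PySem.List.enumerate (List.take s DM_TITLE_PRIORITY) 0,
      PySem.Str.isIn pr.2 (titleRaw p) = false := by
    intro pr hpr
    by_contra hne
    have hin : PySem.Str.isIn pr.2 (titleRaw p) = true := by
      cases h : PySem.Str.isIn pr.2 (titleRaw p)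
      · exact absurd h hne
      · rfl
    have hkw : pr.2 ∈ List.take s DM_TITLE_PRIORITY := by
      rw [PySem.List.mem_enumerate_iff] at hpr
      obtain ⟨k, hk, rfl⟩ := hpr
      exact List.getElem_mem hk
    have hlt := pvInner_lt_of_match (List.take s DM_TITLE_PRIORITY) 0 (titleRaw p)
      ⟨pr.2, hkw, hin⟩
    rw [hlen] at hlt
    have hmain : pvM p < (s : Int) := by
      have heq : pvM p = pvInner (titleRaw p)
          (PySem.List.enumerate (List.take s DM_TITLE_PRIORITY) 0) := by
        conv_lhs => rw [pvM, hsplit, PySem.List.enumerate_append]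
        exact pvInner_append_match _ _ _ ⟨pr, hpr, hin⟩
      omega
    omega
  conv_lhs => rw [pvM, hsplit, PySem.List.enumerate_append]
  rw [pvInner_append_skip _ _ _ hpre, hlen]
  norm_num

-- if the keyword at position s matches, the first-match index is exactly s
theorem pvM_eq_of_head_match (p : List (String × Option String)) (s : Nat) (k : String)
    (ks : List String) (hdrop : List.drop s DM_TITLE_PRIORITY = k :: ks)
    (hs : (s : Int) ≤ pvM p) (hin : PySem.Str.isIn k (titleRaw p) = true) :
    pvM p = (s : Int) := by
  rw [pvM_eq_suffix p s (k :: ks) hdrop hs, PySem.List.enumerate_cons]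
  simp only [pvInner]
  rw [if_pos hin]

-- if it does not match, the first-match index moves past s
theorem pvM_ge_of_head_miss (p : List (String × Option String)) (s : Nat) (k : String)
    (ks : List String) (hdrop : List.drop s DM_TITLE_PRIORITY = k :: ks)
    (hs : (s : Int) ≤ pvM p) (hin : PySem.Str.isIn k (titleRaw p) = false) :
    (s : Int) + 1 ≤ pvM p := by
  have hslt : s < DM_TITLE_PRIORITY.length := by
    by_contra hgt
    rw [List.drop_eq_nil_of_le (by omega)] at hdrop
    exact absurd hdrop (by simp)
  have hlenks : s + 1 + ks.length = 14 := by
    have := congrArg List.length hdrop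
    rw [List.length_drop, DM_len] at this
    simp at this
    rw [DM_len] at hslt
    omega
  rw [pvM_eq_suffix p s (k :: ks) hdrop hs, PySem.List.enumerate_cons]
  simp only [pvInner]
  rw [if_neg (by rw [hin]; simp)]
  rcases pvInner_range ks ((s : Int) + 1) (titleRaw p) with h | ⟨h1, _⟩
  · omega
  · omega

-- ===== pvJ (running minimum) facts =====
theorem pvJ_le_init (xs : List (List (String × Option String))) (bi : Int) : pvJ bi xs ≤ bi := by
  induction xs generalizing bi with
  | nil => simp [pvJ]
  | cons x xs ih =>
    simp only [pvJ, List.foldl_cons] at *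
    have := ih (min bi (pvM x))
    omega

theorem pvJ_le_mem (xs : List (List (String × Option String))) (bi : Int)
    (x : List (String × Option String)) (hx : x ∈ xs) : pvJ bi xs ≤ pvM x := by
  induction xs generalizing bi with
  | nil => simp at hx
  | cons y ys ih =>
    simp only [pvJ, List.foldl_cons] at *
    rcases List.mem_cons.mp hx with rfl | hx'
    · have := pvJ_le_init ys (min bi (pvM x))
      simp only [pvJ] at this
      omega
    · exact ih (min bi (pvM y)) hx'

theorem pvJ_ge (xs : List (List (String × Option String))) (bi c : Int)
    (h : ∀ x ∈ xs, c ≤ pvM x) (hbi : c ≤ bi) : c ≤ pvJ bi xs := by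
  induction xs generalizing bi with
  | nil => simpa [pvJ]
  | cons x xs ih =>
    have hx := h x (by simp)
    simp only [pvJ, List.foldl_cons]
    exact ih (min bi (pvM x)) (fun y hy => h y (by simp [hy])) (by omega)

theorem pvJ_attained (xs : List (List (String × Option String))) (bi : Int) :
    pvJ bi xs = bi ∨ ∃ x ∈ xs, pvJ bi xs = pvM x := by
  induction xs generalizing bi with
  | nil => left; simp [pvJ]
  | cons x xs ih =>
    simp only [pvJ, List.foldl_cons]
    rcases ih (min bi (pvM x)) with h | ⟨y, hy, hEq⟩
    · by_cases hle : bi ≤ pvM x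
      · left
        simp only [pvJ] at h
        omega
      · right
        refine ⟨x, by simp, ?_⟩
        simp only [pvJ] at h
        omega
    · right
      exact ⟨y, by simp [hy], hEq⟩

-- ===== A's fold characterised =====
theorem pvALoop_snd (xs : List (List (String × Option String)))
    (bp : Option (List (String × Option String))) (bi : Int) :
    (pvALoop xs (bp, bi)).2 = pvJ bi xs := by
  induction xs generalizing bp bi with
  | nil => simp [pvALoop, pvJ]
  | cons x xs ih =>
    simp only [pvALoop, pvM_def, pvJ, List.foldl_cons]
    split
    · rename_i h
      rw [ih]
      simp only [pvJ]
      congr 1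
      omega
    · rename_i h
      rw [ih]
      simp only [pvJ]
      congr 1
      omega

theorem pvALoop_fst (xs : List (List (String × Option String)))
    (bp : Option (List (String × Option String))) (bi : Int) :
    (pvALoop xs (bp, bi)).1 =
      if pvJ bi xs < bi then xs.find? (fun x => decide (pvM x = pvJ bi xs)) else bp := by
  induction xs generalizing bp bi with
  | nil => simp [pvALoop, pvJ]
  | cons x xs ih =>
    have hcons : pvJ bi (x :: xs) = pvJ (min bi (pvM x)) xs := by
      simp [pvJ]
    simp only [pvALoop, pvM_def]
    split
    · rename_i h
      -- person x improves: new state (some x, pvM x)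
      have hmin : min bi (pvM x) = pvM x := by omega
      rw [ih, hcons, hmin]
      have hJle : pvJ (pvM x) xs ≤ pvM x := pvJ_le_init xs (pvM x)
      by_cases hlt : pvJ (pvM x) xs < pvM x
      · rw [if_pos hlt, if_pos (by omega), List.find?_cons_of_neg (by simp; omega)]
      · have heq : pvJ (pvM x) xs = pvM x := by omega
        rw [if_neg hlt, if_pos (by omega), List.find?_cons_of_pos (by simp [heq])]
    · rename_i h
      -- person x does not improve
      have hmin : min bi (pvM x) = bi := by omega
      rw [ih, hcons, hmin]
      by_cases hlt : pvJ bi xs < bi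
      · rw [if_pos hlt, if_pos hlt, List.find?_cons_of_neg (by simp; omega)]
      · rw [if_neg hlt, if_neg hlt]

-- ===== B's search characterised =====
theorem pvFind_eq (kw : String) (ps : List (List (String × Option String))) :
    pvFind kw ps = ps.find? (fun p => PySem.Str.isIn kw (titleRaw p)) := by
  induction ps with
  | nil => rfl
  | cons p ps ih =>
    simp only [pvFind]
    rw [List.find?_cons]
    cases h : PySem.Str.isIn kw (titleRaw p)
    · simpa using ih
    · simp

theorem find?_congr_mem {α : Type} (l : List α) (p q : α → Bool)
    (h : ∀ a ∈ l, p a = q a) : l.find? p = l.find? q := by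
  induction l with
  | nil => rfl
  | cons a l ih =>
    simp only [List.find?_cons]
    rw [h a (by simp)]
    split
    · rfl
    · exact ih (fun b hb => h b (by simp [hb]))

theorem pvScan_char (ks : List String) (s : Nat)
    (hdrop : List.drop s DM_TITLE_PRIORITY = ks)
    (people : List (List (String × Option String)))
    (hs : ∀ p ∈ people, (s : Int) ≤ pvM p) :
    pvScan (PySem.List.enumerate ks (s : Int)) people =
      if pvJ 14 people < 14 then
        (people.find? (fun p => decide (pvM p = pvJ 14 people))).map
          (fun q => (pvJ 14 people, q))
      else none := by
  induction ks generalizing s with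
  | nil =>
    rw [PySem.List.enumerate_nil]
    have hsge : 14 ≤ s := by
      have hlend := congrArg List.length hdrop
      rw [List.length_drop, DM_len] at hlend
      simp only [List.length_nil] at hlend
      omega
    have h14 : (14 : Int) ≤ pvJ 14 people :=
      pvJ_ge people 14 14 (fun p hp => by have := hs p hp; omega) le_rfl
    rw [if_neg (by omega)]
    rfl
  | cons k ks ih =>
    have hslt : s < 14 := by
      have hlend := congrArg List.length hdrop
      rw [List.length_drop, DM_len] at hlend
      simp only [List.length_cons] at hlend
      omega
    rw [PySem.List.enumerate_cons]
    simp only [pvScan]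
    rw [pvFind_eq]
    have hiff : ∀ p ∈ people,
        PySem.Str.isIn k (titleRaw p) = decide (pvM p = (s : Int)) := by
      intro p hp
      cases hin : PySem.Str.isIn k (titleRaw p)
      · have hge := pvM_ge_of_head_miss p s k ks hdrop (hs p hp) hin
        have hne : pvM p ≠ (s : Int) := by omega
        simp [hne]
      · have := pvM_eq_of_head_match p s k ks hdrop (hs p hp) hin
        simp [this]
    rcases hfind : people.find? (fun p => PySem.Str.isIn k (titleRaw p)) with _ | q
    · -- nobody matches keyword k
      have hnone : ∀ p ∈ people, PySem.Str.isIn k (titleRaw p) = false := by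
        intro p hp
        have := List.find?_eq_none.mp hfind p hp
        cases h : PySem.Str.isIn k (titleRaw p)
        · rfl
        · exact absurd h this
      have hs' : ∀ p ∈ people, ((s + 1 : Nat) : Int) ≤ pvM p := by
        intro p hp
        have := pvM_ge_of_head_miss p s k ks hdrop (hs p hp) (hnone p hp)
        push_cast
        omega
      have hdrop' : List.drop (s + 1) DM_TITLE_PRIORITY = ks := by
        have h1 := congrArg List.tail hdrop
        rw [List.tail_cons] at h1
        rwa [List.tail_drop] at h1
      have hres := ih (s + 1) hdrop' hs'
      push_cast at hres
      exact hres
    · -- q = the first person matching keyword k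
      have hqmem : q ∈ people := List.mem_of_find?_eq_some hfind
      have hqin : PySem.Str.isIn k (titleRaw q) = true :=
        List.find?_some (p := fun p => PySem.Str.isIn k (titleRaw p)) hfind
      have hqM : pvM q = (s : Int) := pvM_eq_of_head_match q s k ks hdrop (hs q hqmem) hqin
      have hJle : pvJ 14 people ≤ (s : Int) := by
        have := pvJ_le_mem people 14 q hqmem
        omega
      have hJge : (s : Int) ≤ pvJ 14 people := pvJ_ge people 14 s hs (by omega)
      have hJ : pvJ 14 people = (s : Int) := le_antisymm hJle hJge
      rw [if_pos (by omega), hJ]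
      rw [find?_congr_mem people _ _ hiff] at hfind
      rw [hfind]
      rfl

-- character of both programs on a nonempty list, in terms of J = min first-match index
set_option maxHeartbeats 1000000 in
theorem pick_A_eq (p0 : List (String × Option String))
    (rest : List (List (String × Option String))) :
    pick_decision_maker (p0 :: rest) =
      some (buildResult (((p0 :: rest).find?
          (fun x => decide (pvM x = pvJ 14 (p0 :: rest)))).getD p0)
        (if pvJ 14 (p0 :: rest) < 6 then "HIGH" else "MEDIUM")) := by
  have h15 : pvJ ((DM_TITLE_PRIORITY.length : Int) + 1) (p0 :: rest) = pvJ 14 (p0 :: rest) := by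
    simp only [pvJ, List.foldl_cons]
    rw [DM_len]
    have := pvM_le p0
    congr 1
    omega
  have hJlt : pvJ ((DM_TITLE_PRIORITY.length : Int) + 1) (p0 :: rest) <
      (DM_TITLE_PRIORITY.length : Int) + 1 := by
    rw [h15, DM_len]
    have h1 := pvJ_le_mem (p0 :: rest) 14 p0 (by simp)
    have h2 := pvM_le p0
    push_cast
    omega
  have hfst := pvALoop_fst (p0 :: rest) none ((DM_TITLE_PRIORITY.length : Int) + 1)
  have hsnd := pvALoop_snd (p0 :: rest) none ((DM_TITLE_PRIORITY.length : Int) + 1)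
  rw [if_pos hJlt, h15] at hfst
  -- the find? succeeds: the minimum is attained
  have hex : ∃ x ∈ (p0 :: rest), pvJ 14 (p0 :: rest) = pvM x := by
    rcases pvJ_attained (p0 :: rest) 14 with h | h
    · refine ⟨p0, by simp, ?_⟩
      have h1 := pvJ_le_mem (p0 :: rest) 14 p0 (by simp)
      have h2 := pvM_le p0
      omega
    · exact h
  obtain ⟨x, hxmem, hxeq⟩ := hex
  have hfind : ((p0 :: rest).find? (fun y => decide (pvM y = pvJ 14 (p0 :: rest)))).isSome := by
    rw [List.find?_isSome]
    exact ⟨x, hxmem, by simp [hxeq.symm]⟩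
  rcases hq : (p0 :: rest).find? (fun y => decide (pvM y = pvJ 14 (p0 :: rest))) with _ | q
  · rw [hq] at hfind; simp at hfind
  · have hgoal : pick_decision_maker (p0 :: rest) =
        (match pvALoop (p0 :: rest) (none, (DM_TITLE_PRIORITY.length : Int) + 1) with
        | (none, _) => some (buildResult p0 "LOW")
        | (some bp, bi) => some (buildResult bp (if bi < 6 then "HIGH" else "MEDIUM"))) := rfl
    rcases hloop : pvALoop (p0 :: rest) (none, (DM_TITLE_PRIORITY.length : Int) + 1) with ⟨bp, bi⟩
    rw [hloop] at hfst hsnd hgoal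
    simp only at hfst hsnd
    rw [hq] at hfst
    subst hfst
    rw [hgoal]
    simp only [Option.getD_some]
    rw [hsnd, h15]

theorem pick_B_eq (p0 : List (String × Option String))
    (rest : List (List (String × Option String))) :
    pick_decision_maker_alt (p0 :: rest) =
      if pvJ 14 (p0 :: rest) < 14 then
        some (buildResult (((p0 :: rest).find?
            (fun x => decide (pvM x = pvJ 14 (p0 :: rest)))).getD p0)
          (if pvJ 14 (p0 :: rest) < 6 then "HIGH" else "MEDIUM"))
      else some (buildResult p0 "MEDIUM") := by
  have hscan := pvScan_char DM_TITLE_PRIORITY 0 (by simp) (p0 :: rest)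
    (fun p _ => by simpa using pvM_nonneg p)
  simp only [Nat.cast_zero] at hscan
  simp only [pick_decision_maker_alt]
  rw [hscan]
  by_cases hJ : pvJ 14 (p0 :: rest) < 14
  · rw [if_pos hJ, if_pos hJ]
    rcases hq : (p0 :: rest).find? (fun x => decide (pvM x = pvJ 14 (p0 :: rest))) with _ | q
    · -- impossible: the minimum below 14 is attained, but handle by cases anyway
      exfalso
      rcases pvJ_attained (p0 :: rest) 14 with h | ⟨x, hx, hEq⟩
      · omega
      · have := List.find?_eq_none.mp hq x hx
        simp [hEq.symm] at this
    · rfl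
  · rw [if_neg hJ, if_neg hJ]

-- ===== VERDICT (by name: the statement is the Claim_ definition above) =====
theorem pick_decision_maker_spec : Claim_equal_pick_decision_maker := by
  intro people _
  show pick_decision_maker people = pick_decision_maker_alt people
  match people with
  | [] => rfl
  | p0 :: rest =>
    rw [pick_A_eq, pick_B_eq]
    by_cases hJ : pvJ 14 (p0 :: rest) < 14
    · rw [if_pos hJ]
    · rw [if_neg hJ]
      have hJ14 : pvJ 14 (p0 :: rest) = 14 := by
        have := pvJ_le_init (p0 :: rest) 14
        omega
      have hM0 : pvM p0 = 14 := by
        have h1 := pvJ_le_mem (p0 :: rest) 14 p0 (by simp)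
        have h2 := pvM_le p0
        omega
      rw [hJ14, List.find?_cons_of_pos (by simp [hM0]), if_neg (by omega)]
      simp
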